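-- pv_equiv track=rewrite | github.com/StUnTmAkEr/Aetherra | Aetherra/system/core_migrated/personality/personality/memory_learning.py | _count_personal_pronouns
-- ===== SOURCE A (Python) =====
-- def _count_personal_pronouns(text: str) -> int:
--     """Count personal pronouns in text"""
--     pronouns = [
--         "i",
--         "me",
--         "my",
--         "myself",
--         "we",
--         "us",
--         "our",
--         "you",
--         "your",
--         "yourself",
--     ]
--     words = text.lower().split()
--     return sum(1 for word in words if word in pronouns)
-- ===== SOURCE B (Python) =====
-- def _count_personal_pronouns(text: str) -> int:
--     """Count personal pronouns in text"""
--     counts = {}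
--     for word in text.lower().split():
--         counts[word] = counts.get(word, 0) + 1
--     pronouns = (
--         "i",
--         "me",
--         "my",
--         "myself",
--         "we",
--         "us",
--         "our",
--         "you",
--         "your",
--         "yourself",
--     )
--     return sum(counts.get(p, 0) for p in pronouns)
-- ===== Notes on version B (the rewrite author's own statement) =====
-- stated objective: alternative
-- what changed: Instead of testing each word for membership in the pronoun list, B builds a word-frequency dictionary in one pass over the words and then sums the counts of the ten fixed pronouns, inverting which collection the summing loop runs over.
import Mathlib
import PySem

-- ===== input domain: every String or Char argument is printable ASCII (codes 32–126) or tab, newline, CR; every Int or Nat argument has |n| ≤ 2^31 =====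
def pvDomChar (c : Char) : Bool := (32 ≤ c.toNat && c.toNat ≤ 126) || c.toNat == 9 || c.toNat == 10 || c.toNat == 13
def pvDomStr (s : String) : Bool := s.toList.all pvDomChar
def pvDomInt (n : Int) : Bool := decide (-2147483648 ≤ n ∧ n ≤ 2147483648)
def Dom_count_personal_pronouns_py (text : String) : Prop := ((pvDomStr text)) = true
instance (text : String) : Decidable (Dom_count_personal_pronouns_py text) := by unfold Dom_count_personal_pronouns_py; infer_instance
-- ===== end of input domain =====

-- B inverts the traversal: it builds a word-frequency dictionary in one pass over the
-- words and then sums the counts of the ten fixed pronouns (objective: alternative).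


-- ===== PORT A =====
-- A's fixed pronoun list (module-level so the lemmas below can name it)
def pronounsA : List String :=
  ["i", "me", "my", "myself", "we", "us", "our", "you", "your", "yourself"]

def count_personal_pronouns_py (text : String) : Int :=
  let words := PySem.Str.split₀ (PySem.Str.lower text)
  (((words.filter (fun w => pronounsA.contains w)).map (fun _ => (1 : Int)))).sum

-- ===== PORT B =====
def count_personal_pronouns_py_alt (text : String) : Int :=
  let counts : PySem.Dict String Int :=
    (PySem.Str.split₀ (PySem.Str.lower text)).foldl
      (fun d w => d.insert w (d.getD w 0 + 1)) PySem.Dict.empty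
  let pronouns : List String :=
    ["i", "me", "my", "myself", "we", "us", "our", "you", "your", "yourself"]
  (pronouns.map (fun p => counts.getD p 0)).sum

-- ===== PRECONDITION & SPEC =====
def Spec_count_personal_pronouns_py (text : String) (out : Int) : Prop := out = count_personal_pronouns_py_alt text
instance (text : String) (out : Int) : Decidable (Spec_count_personal_pronouns_py text out) := by unfold Spec_count_personal_pronouns_py; infer_instance

-- ===== CLAIM (what is proved, stated in full; the proofs are below) =====
def Claim_equal_count_personal_pronouns_py : Prop := ∀ (text : String), Dom_count_personal_pronouns_py text → Spec_count_personal_pronouns_py text (count_personal_pronouns_py text)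

-- ===== LEMMAS AND PROOFS =====

-- splitting the indicator of a (w == p || c w) membership when no element equals p among c
theorem countP_or_head (ws : List String) (p : String) (c : String → Bool)
    (h : c p = false) :
    ws.countP (fun w => (w == p) || c w) = ws.count p + ws.countP c := by
  induction ws with
  | nil => simp
  | cons x xs ih =>
    by_cases hx : x = p
    · subst hx
      simp [h, ih]
      omega
    · simp [List.countP_cons, hx, ih]
      rcases hc : c x
      · simp
      · omega

-- the word-scan indicator sum equals the pronoun-scan count sum, for any nodup pronoun list
theorem indicator_eq_counts (ws : List String) :
    ∀ ps : List String, ps.Nodup →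
      (ws.countP (fun w => ps.contains w) : Int)
        = (ps.map (fun p => (ws.count p : Int))).sum := by
  intro ps
  induction ps with
  | nil => intro _; simp
  | cons p ps ih =>
    intro hnd
    rcases List.nodup_cons.mp hnd with ⟨hp, hnd'⟩
    have hcp : ps.contains p = false := by
      simpa using hp
    have := countP_or_head ws p (fun w => ps.contains w) hcp
    simp only [List.contains_cons, List.map_cons, List.sum_cons]
    push_cast [this]
    rw [ih hnd']

theorem a_sum_eq_countP (ws : List String) :
    (((ws.filter (fun w => pronounsA.contains w)).map (fun _ => (1 : Int)))).sum
      = (ws.countP (fun w => pronounsA.contains w) : Int) := by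
  induction ws with
  | nil => simp
  | cons x xs ih =>
    by_cases hx : pronounsA.contains x = true
    · rw [List.filter_cons_of_pos hx, List.map_cons, List.sum_cons,
        List.countP_cons_of_pos hx, ih]
      push_cast
      ring
    · rw [List.filter_cons_of_neg hx, List.countP_cons_of_neg hx, ih]

theorem b_sum_eq_counts (ws : List String) :
    ((["i", "me", "my", "myself", "we", "us", "our", "you", "your", "yourself"] : List String).map
        (fun p =>
          ((ws.foldl (fun d w => d.insert w (d.getD w 0 + 1)) PySem.Dict.empty).getD p 0))).sum
      = (pronounsA.map (fun p => (ws.count p : Int))).sum := by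
  apply congrArg
  apply List.map_congr_left
  intro p _
  simpa using PySem.Dict.getD_foldl_insert_add_one ws PySem.Dict.empty p

theorem pronounsA_nodup : pronounsA.Nodup := by decide

theorem count_personal_pronouns_py_eq (text : String) :
    count_personal_pronouns_py text = count_personal_pronouns_py_alt text := by
  unfold count_personal_pronouns_py count_personal_pronouns_py_alt
  simp only [b_sum_eq_counts, a_sum_eq_countP]
  rw [indicator_eq_counts _ pronounsA pronounsA_nodup]

-- ===== VERDICT (by name: the statement is the Claim_ definition above) =====
theorem count_personal_pronouns_py_spec : Claim_equal_count_personal_pronouns_py := by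
  intro text _
  exact count_personal_pronouns_py_eq text
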